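-- pv_equiv track=rewrite | github.com/padp/padp | PyModules/Saw_Scrape_V3-Backend.py | append_to_saw_constants
-- ===== SOURCE A (Python) =====
-- def append_to_saw_constants(scalar_lists, c_lists):
-- 	l = []
-- 	for scalar in scalar_lists:
-- 		for constant in c_lists:
-- 			if scalar.startswith(constant[:-4]):
-- 				if scalar not in l:
-- 					l.append(scalar)
-- 	return l
-- ===== SOURCE B (Python) =====
-- def append_to_saw_constants(scalar_lists, c_lists):
--     # Staged passes: build the set of trimmed prefixes once, test each scalar by
--     # looking its OWN prefixes up in that set (bounded by the longest prefix),
--     # then dedup the filtered stream order-preservingly via dict.fromkeys.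
--     prefixes = {c[:-4] for c in c_lists}
--     maxlen = max(map(len, prefixes), default=-1)
--     matching = filter(
--         lambda s: any(s[:k] in prefixes for k in range(min(len(s), maxlen) + 1)),
--         scalar_lists)
--     return list(dict.fromkeys(matching))
-- ===== Notes on version B (the rewrite author's own statement) =====
-- stated objective: faster
-- what changed: Replaces A's nested scan-constants-per-scalar with dedup-by-list-membership by staged passes: build the set of trimmed prefixes once, test each scalar by looking its own prefixes (bounded by the longest trimmed constant) up in that set, then order-preserving dedup of the filtered stream via dict.fromkeys.
import Mathlib
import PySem

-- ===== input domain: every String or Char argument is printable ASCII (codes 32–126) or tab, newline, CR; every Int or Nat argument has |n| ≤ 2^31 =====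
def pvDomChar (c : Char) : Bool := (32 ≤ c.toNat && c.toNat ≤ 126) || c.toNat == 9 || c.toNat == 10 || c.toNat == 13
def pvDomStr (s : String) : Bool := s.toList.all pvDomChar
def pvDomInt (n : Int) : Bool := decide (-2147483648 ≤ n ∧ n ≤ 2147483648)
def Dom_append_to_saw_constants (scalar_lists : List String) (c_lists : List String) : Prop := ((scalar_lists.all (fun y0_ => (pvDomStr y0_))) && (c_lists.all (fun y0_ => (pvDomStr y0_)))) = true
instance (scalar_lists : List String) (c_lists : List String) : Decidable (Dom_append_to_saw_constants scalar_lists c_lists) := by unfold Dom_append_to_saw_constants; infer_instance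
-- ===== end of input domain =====

-- B replaces A's nested constant scan and list-membership dedup by staged passes: a prefix SET looked up
-- against the scalar's own prefixes (bounded by the longest trimmed constant), then an ordered dedup.

-- ===== PORT A =====
def append_to_saw_constants (scalar_lists : List String) (c_lists : List String) : List String :=
  scalar_lists.foldl (fun l scalar =>
    c_lists.foldl (fun l constant =>
      if PySem.Str.startswith scalar (PySem.Str.slice constant none (some (-4))) then
        if scalar ∈ l then l else l ++ [scalar]
      else l) l) []

-- ===== PORT B =====
def append_to_saw_constants_alt (scalar_lists : List String) (c_lists : List String) : List String :=
  let prefixes : PySem.Set String :=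
    PySem.Set.ofList (c_lists.map (fun c => PySem.Str.slice c none (some (-4))))
  let maxlen : Int := PySem.List.maxD (prefixes.map PySem.Str.len) (fun x => x) (-1)
  let matching := scalar_lists.filter (fun s =>
    (PySem.List.pyRange 0 (min (PySem.Str.len s) maxlen + 1) 1).any
      (fun k => PySem.Set.contains prefixes (PySem.Str.slice s none (some k))))
  PySem.List.dedup matching

-- ===== PRECONDITION & SPEC =====
def Spec_append_to_saw_constants (scalar_lists : List String) (c_lists : List String) (out : List String) : Prop := out = append_to_saw_constants_alt scalar_lists c_lists
instance (scalar_lists : List String) (c_lists : List String) (out : List String) : Decidable (Spec_append_to_saw_constants scalar_lists c_lists out) := by unfold Spec_append_to_saw_constants; infer_instance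

-- ===== CLAIM (what is proved, stated in full; the proofs are below) =====
def Claim_equal_append_to_saw_constants : Prop := ∀ (scalar_lists : List String) (c_lists : List String), Dom_append_to_saw_constants scalar_lists c_lists → Spec_append_to_saw_constants scalar_lists c_lists (append_to_saw_constants scalar_lists c_lists)

-- ===== LEMMAS AND PROOFS =====

-- A's inner loop over the constants (predicate Q generalized) appends the scalar once iff some constant matches and it is not yet present.
theorem inner_loop_eq (Q : String → Bool) (s : String) (cs : List String) (l : List String) :
    cs.foldl (fun l c => if Q c then (if s ∈ l then l else l ++ [s]) else l) l
    = if (cs.any Q && !(decide (s ∈ l))) then l ++ [s] else l := by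
  induction cs generalizing l with
  | nil => simp
  | cons c cs ih =>
    simp only [List.foldl_cons, List.any_cons]
    by_cases h : Q c = true
    · by_cases hm : s ∈ l
      · simp [h, hm, ih]
      · rw [if_pos h, if_neg hm, ih]
        simp [h, hm]
    · simp only [Bool.not_eq_true] at h
      simp [h, ih]

-- A's collapsed outer loop is 'filter then build-a-set' (= ordered dedup of the matching scalars).
theorem collapsed_eq_filter_foldl (P : String → Bool) (ss l : List String) :
    ss.foldl (fun l s => if (P s && !(decide (s ∈ l))) then l ++ [s] else l) l
    = (ss.filter P).foldl PySem.Set.add l := by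
  rw [List.foldl_filter]
  congr 1
  funext l s
  by_cases h : P s <;> by_cases hm : s ∈ l <;>
    simp [PySem.Set.add, PySem.Set.contains, h, hm]

-- the two match tests agree: looking the scalar's own prefixes (bounded by maxlen) up in the
-- prefix set equals scanning the prefixes for a startswith hit.
theorem match_eq (ps : List String) (maxlen : Int)
    (hmax : ∀ p ∈ ps, PySem.Str.len p ≤ maxlen) (s : String) :
    (PySem.List.pyRange 0 (min (PySem.Str.len s) maxlen + 1) 1).any
      (fun k => PySem.Set.contains (PySem.Set.ofList ps) (PySem.Str.slice s none (some k)))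
    = ps.any (fun p => PySem.Str.startswith s p) := by
  rw [Bool.eq_iff_iff]
  simp only [List.any_eq_true]
  constructor
  · rintro ⟨k, hk, hcont⟩
    rw [PySem.List.mem_pyRange_one] at hk
    obtain ⟨hk0, _⟩ := hk
    have hmem : PySem.Str.slice s none (some k) ∈ ps :=
      (PySem.Set.mem_ofList ps _).mp (List.contains_iff_mem.mp hcont)
    refine ⟨_, hmem, ?_⟩
    simp only [PySem.Str.startswith, PySem.Chars.startswith, List.isPrefixOf_iff_prefix]
    obtain ⟨n, hn⟩ : ∃ n : Nat, k = (n : Int) := ⟨k.toNat, (Int.toNat_of_nonneg hk0).symm⟩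
    subst hn
    have : (PySem.Str.slice s none (some (n : Int))).toList = s.toList.take n := by
      simp [PySem.Str.slice, PySem.Chars.slice, PySem.List.slice_to_natCast]
    rw [this]
    exact List.take_prefix n s.toList
  · rintro ⟨p, hp, hsw⟩
    simp only [PySem.Str.startswith, PySem.Chars.startswith, List.isPrefixOf_iff_prefix] at hsw
    refine ⟨(p.toList.length : Int), ?_, ?_⟩
    · rw [PySem.List.mem_pyRange_one]
      have h1 : (p.toList.length : Int) ≤ PySem.Str.len s := by
        simp only [PySem.Str.len]; exact_mod_cast hsw.length_le
      have h2 : (p.toList.length : Int) ≤ maxlen := by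
        have := hmax p hp; simpa [PySem.Str.len] using this
      omega
    · have hslice : PySem.Str.slice s none (some (p.toList.length : Int)) = p := by
        apply String.toList_inj.mp
        have : (PySem.Str.slice s none (some (p.toList.length : Int))).toList
            = s.toList.take p.toList.length := by
          simp [PySem.Str.slice, PySem.Chars.slice, PySem.List.slice_to_natCast]
        rw [this, ← List.prefix_iff_eq_take.mp hsw]
      rw [hslice]
      exact List.contains_iff_mem.mpr ((PySem.Set.mem_ofList ps p).mpr hp)

-- ===== VERDICT (by name: the statement is the Claim_ definition above) =====
theorem append_to_saw_constants_spec : Claim_equal_append_to_saw_constants := by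
  intro ss cs _
  unfold Spec_append_to_saw_constants append_to_saw_constants append_to_saw_constants_alt
  have hstep : (fun (l : List String) scalar =>
      cs.foldl (fun l constant =>
        if PySem.Str.startswith scalar (PySem.Str.slice constant none (some (-4))) then
          if scalar ∈ l then l else l ++ [scalar]
        else l) l)
    = (fun (l : List String) s =>
        if ((cs.any (fun c => PySem.Str.startswith s (PySem.Str.slice c none (some (-4))))) && !(decide (s ∈ l)))
        then l ++ [s] else l) := by
    funext l s
    exact inner_loop_eq (fun c => PySem.Str.startswith s (PySem.Str.slice c none (some (-4)))) s cs l
  rw [hstep, collapsed_eq_filter_foldl]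
  rw [PySem.List.dedup_eq_ofList, PySem.Set.ofList_eq_foldl]
  congr 1
  apply List.filter_congr
  intro s _
  have h1 := match_eq (cs.map (fun c => PySem.Str.slice c none (some (-4))))
      (PySem.List.maxD
        ((PySem.Set.ofList (cs.map (fun c => PySem.Str.slice c none (some (-4))))).map PySem.Str.len)
        (fun x => x) (-1))
      (fun p hp => PySem.List.le_maxD_id _ _ _
        (List.mem_map.mpr ⟨p, (PySem.Set.mem_ofList _ p).mpr hp, rfl⟩)) s
  rw [h1, List.any_map]
  rfl
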